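-- pv_equiv track=rewrite | github.com/dspacenet/sccp-client | maude.py | eraseMaudeSpaces
-- ===== SOURCE A (Python) =====
-- def eraseMaudeSpaces(string):
--     new = ""
--     i = 0
--     n = len(string)
--     while i < n-1:
--         if not string[i].isspace() or (string[i].isspace() and not string[i+1].isspace()):
--             new += string[i]
--         i += 1
--     return new
-- ===== SOURCE B (Python) =====
-- def eraseMaudeSpaces(string):
--     # Collapse each maximal whitespace run to its last char (look-behind replace),
--     # then drop the final character -- one pass, no index arithmetic.
--     out = []
--     for c in string:
--         if c.isspace() and out and out[-1].isspace():
--             out[-1] = c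
--         else:
--             out.append(c)
--     return ''.join(out)[:-1]
-- ===== Notes on version B (the rewrite author's own statement) =====
-- stated objective: simpler
-- what changed: Replaces A's index-based while loop with a look-ahead at the next character and quadratic string concatenation by a single look-behind pass that collapses each whitespace run to its last character into a list, then joins and slices off the final character.
import Mathlib
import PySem

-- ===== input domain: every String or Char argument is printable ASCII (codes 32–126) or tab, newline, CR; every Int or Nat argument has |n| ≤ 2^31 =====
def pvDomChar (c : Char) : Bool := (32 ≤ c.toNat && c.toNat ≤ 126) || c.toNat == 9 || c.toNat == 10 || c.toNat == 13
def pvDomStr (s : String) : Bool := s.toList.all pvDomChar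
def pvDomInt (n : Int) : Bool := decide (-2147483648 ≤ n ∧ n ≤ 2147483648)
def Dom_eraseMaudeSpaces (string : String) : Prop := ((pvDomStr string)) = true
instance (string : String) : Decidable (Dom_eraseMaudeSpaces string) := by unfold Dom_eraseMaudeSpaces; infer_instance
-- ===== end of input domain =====

-- B collapses whitespace runs with a single look-behind pass and slices off the
-- last char, instead of A's index/look-ahead while loop (objective: simpler).

-- ===== PORT A =====
-- the while loop: i runs while i < n-1, appending string[i] when kept
def eraseMaudeSpacesLoop (cs : List Char) (n : Nat) (new : List Char) (i : Nat) : List Char :=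
  if i < n - 1 then
    eraseMaudeSpacesLoop cs n
      (if !(PySem.Chars.isspace (cs.getD i ' ')) ||
          (PySem.Chars.isspace (cs.getD i ' ') && !(PySem.Chars.isspace (cs.getD (i+1) ' ')))
       then new ++ [cs.getD i ' '] else new)
      (i + 1)
  else new
termination_by n - 1 - i
decreasing_by omega

def eraseMaudeSpaces (string : String) : String :=
  String.ofList (eraseMaudeSpacesLoop string.toList string.toList.length [] 0)

-- ===== PORT B =====
-- step of B's for-loop: out[-1] = c when collapsing, else out.append(c)
-- (the list `out` is kept reversed, so out[-1] is the head)
def eraseMaudeSpacesStep (out : List Char) (c : Char) : List Char :=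
  match out with
  | p :: rest => if PySem.Chars.isspace c && PySem.Chars.isspace p then c :: rest else c :: p :: rest
  | [] => [c]

def eraseMaudeSpaces_alt (string : String) : String :=
  String.ofList (PySem.List.slice (string.toList.foldl eraseMaudeSpacesStep []).reverse
    none (some (-1)))   -- ''.join(out)[:-1]

-- ===== PRECONDITION & SPEC =====
def Spec_eraseMaudeSpaces (string : String) (out : String) : Prop := out = eraseMaudeSpaces_alt string
instance (string : String) (out : String) : Decidable (Spec_eraseMaudeSpaces string out) := by unfold Spec_eraseMaudeSpaces; infer_instance

-- ===== CLAIM (what is proved, stated in full; the proofs are below) =====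
def Claim_equal_eraseMaudeSpaces : Prop := ∀ (string : String), Dom_eraseMaudeSpaces string → Spec_eraseMaudeSpaces string (eraseMaudeSpaces string)

-- ===== LEMMAS AND PROOFS =====

-- common characterisation: emit a when the pair (a,b) is not two whitespaces
def pvPairScan : List Char → List Char
  | a :: b :: t =>
      (if PySem.Chars.isspace a && PySem.Chars.isspace b then [] else [a]) ++ pvPairScan (b :: t)
  | _ => []

theorem pvPairScan_short (l : List Char) (h : l.length ≤ 1) : pvPairScan l = [] := by
  match l, h with
  | [], _ => rfl
  | [_], _ => rfl

-- A's loop produces the pair scan of the remaining suffix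
theorem loop_eq_pairScan (cs : List Char) (i : Nat) (new : List Char) :
    eraseMaudeSpacesLoop cs cs.length new i = new ++ pvPairScan (cs.drop i) := by
  rw [eraseMaudeSpacesLoop]
  by_cases h : i < cs.length - 1
  · simp only [if_pos h]
    rw [loop_eq_pairScan cs (i + 1)]
    have h1 : i < cs.length := by omega
    have h2 : i + 1 < cs.length := by omega
    rw [List.drop_eq_getElem_cons h1, List.drop_eq_getElem_cons h2]
    rw [List.getD_eq_getElem cs ' ' h1, List.getD_eq_getElem cs ' ' h2]
    rw [pvPairScan]
    cases hsa : PySem.Chars.isspace cs[i] <;> cases hsb : PySem.Chars.isspace cs[i+1] <;> simp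
  · simp only [if_neg h]
    rw [pvPairScan_short _ (by simp only [List.length_drop]; omega)]
    simp
termination_by cs.length - 1 - i
decreasing_by omega

-- B's fold: the tail of the accumulator below the head is inert
theorem foldl_step_split (cs : List Char) (p : Char) (rest : List Char) :
    cs.foldl eraseMaudeSpacesStep (p :: rest) = cs.foldl eraseMaudeSpacesStep [p] ++ rest := by
  induction cs generalizing p rest with
  | nil => rfl
  | cons c cs ih =>
      simp only [List.foldl_cons, eraseMaudeSpacesStep]
      by_cases h : (PySem.Chars.isspace c && PySem.Chars.isspace p) = true
      · simp only [if_pos h]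
        exact ih c rest
      · simp only [if_neg h]
        rw [ih c (p :: rest), ih c [p], List.append_assoc]
        rfl

theorem foldl_step_ne_nil (cs : List Char) (p : Char) :
    cs.foldl eraseMaudeSpacesStep [p] ≠ [] := by
  induction cs generalizing p with
  | nil => simp
  | cons c cs ih =>
      simp only [List.foldl_cons, eraseMaudeSpacesStep]
      by_cases h : (PySem.Chars.isspace c && PySem.Chars.isspace p) = true
      · simpa [h] using ih c
      · simp only [if_neg h]
        rw [foldl_step_split]
        simp [ih c]

-- B's collapsed-and-dropped result is the pair scan
theorem fold_dropLast_eq_pairScan (t : List Char) (a : Char) :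
    (t.foldl eraseMaudeSpacesStep [a]).reverse.dropLast = pvPairScan (a :: t) := by
  induction t generalizing a with
  | nil => rfl
  | cons b t ih =>
      simp only [List.foldl_cons, eraseMaudeSpacesStep]
      by_cases h : (PySem.Chars.isspace b && PySem.Chars.isspace a) = true
      · simp only [if_pos h]
        rw [ih b, pvPairScan]
        simp only [Bool.and_eq_true] at h
        simp [h.1, h.2]
      · simp only [if_neg h]
        rw [foldl_step_split, List.reverse_append]
        simp only [List.reverse_singleton, List.singleton_append]
        have hne : (t.foldl eraseMaudeSpacesStep [b]).reverse ≠ [] := by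
          simp [foldl_step_ne_nil t b]
        rw [List.dropLast_cons_of_ne_nil hne]
        rw [ih b, pvPairScan]
        have hf : (PySem.Chars.isspace a && PySem.Chars.isspace b) = false := by
          cases hA : PySem.Chars.isspace a <;> cases hB : PySem.Chars.isspace b <;> simp_all
        simp [hf]

-- ===== VERDICT (by name: the statement is the Claim_ definition above) =====
theorem eraseMaudeSpaces_spec : Claim_equal_eraseMaudeSpaces := by
  intro s _
  unfold Spec_eraseMaudeSpaces eraseMaudeSpaces eraseMaudeSpaces_alt
  rw [loop_eq_pairScan s.toList 0 []]
  rw [PySem.List.slice_to_neg_one]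
  cases h : s.toList with
  | nil => rfl
  | cons a t =>
      simp only [List.drop_zero, List.nil_append, List.foldl_cons]
      have hstep : eraseMaudeSpacesStep [] a = [a] := rfl
      rw [hstep, fold_dropLast_eq_pairScan t a]
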